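-- pv_equiv track=rewrite | github.com/QuBenhao/LeetCode | problems/problems_1819/solution.py | countDifferentSubsequenceGCDs
-- ===== SOURCE A (Python) =====
-- import math
--
-- def countDifferentSubsequenceGCDs(nums):
--     """
--     :type nums: List[int]
--     :rtype: int
--     """
--     # 一个数x作为一个序列的最大公约数的必要条件是，序列中所有数都是x的倍数
--     ans = 0
--     nums = set(nums)
--     c = max(nums)
--     # 子序列的最大公约数只可能在1到最大值之间
--     for i in range(1, c+1):
--         g = None
--         # 判断能否构造这个序列, 从i开始步长为i
--         for j in range(i, c+1, i):
--             # j 在nums中，尝试构造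
--             if j in nums:
--                 if not g:
--                     g = j
--                 else:
--                     g = math.gcd(j, g)
--                 # 存在至少两个nums中的数，他们的最大公约数为i
--                 if g == i:
--                     ans += 1
--                     break
--     return ans
-- ===== SOURCE B (Python) =====
-- import math
--
-- def countDifferentSubsequenceGCDs(nums):
--     """
--     :type nums: List[int]
--     :rtype: int
--     """
--     # One pass over the distinct elements: for each positive x, fold x into the
--     # running gcd of every divisor d of x (divisors enumerated in pairs up to
--     # isqrt(x)).  A value d is achievable as a subsequence gcd exactly when the
--     # gcd of all elements divisible by d is d.
--     table = {}
--     for x in set(nums):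
--         if x <= 0:
--             continue
--         for i in range(1, math.isqrt(x) + 1):
--             if x % i == 0:
--                 for d in (i, x // i):
--                     table[d] = math.gcd(table.get(d, 0), x)
--     return sum(1 for d, g in table.items() if d == g)
-- ===== Notes on version B (the rewrite author's own statement) =====
-- stated objective: alternative
-- what changed: Instead of scanning, for every candidate gcd i in 1..max, the multiples of i with an early break, B makes one pass over the distinct elements, folding each positive element x into a dict entry for every divisor d of x (divisors enumerated in pairs (i, x//i) up to isqrt(x)), and finally counts the entries whose running gcd equals their key.
import Mathlib
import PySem

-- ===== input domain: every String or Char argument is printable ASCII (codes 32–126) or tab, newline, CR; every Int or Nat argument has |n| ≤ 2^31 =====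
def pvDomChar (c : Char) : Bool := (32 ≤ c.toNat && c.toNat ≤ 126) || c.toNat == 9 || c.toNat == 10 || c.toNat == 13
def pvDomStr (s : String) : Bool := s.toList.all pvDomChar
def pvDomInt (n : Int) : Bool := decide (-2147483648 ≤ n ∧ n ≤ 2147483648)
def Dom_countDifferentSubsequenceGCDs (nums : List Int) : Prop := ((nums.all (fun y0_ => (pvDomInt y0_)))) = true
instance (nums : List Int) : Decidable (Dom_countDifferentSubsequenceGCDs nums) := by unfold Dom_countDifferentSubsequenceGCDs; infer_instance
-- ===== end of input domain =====

-- B replaces A's per-candidate scan over multiples by a single pass over the distinct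
-- elements that folds each positive element into a divisor-indexed gcd table (alternative
-- decomposition, not claimed faster); return values proved equal on non-empty input.


-- ===== PORT A =====
-- Inner loop of A over the multiples j = i, 2i, … ≤ c; the accumulator g : Int uses 0 for
-- Python's falsy `None` (`if not g` is `g = 0` here: g is otherwise a positive int, and
-- both falsy cases take the `g = j` branch). Returns the 1 added at the break, else 0.
def pvALoop (s : List Int) (i : Int) : List Int → Int → Int
  | [], _ => 0
  | j :: js, g =>
    if s.contains j then
      let g' := if g = 0 then j else (Int.gcd j g : Int)
      if g' = i then 1 else pvALoop s i js g'
    else pvALoop s i js g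

def countDifferentSubsequenceGCDs (nums : List Int) : Int :=
  match PySem.List.max? (PySem.Set.ofList nums) (fun x => x) with
  | none => 0   -- unreachable under Pre_: Python's max raises ValueError on the empty set
  | some c =>
    (PySem.List.pyRange 1 (c + 1) 1).foldl
      (fun ans i => ans + pvALoop (PySem.Set.ofList nums) i (PySem.List.pyRange i (c + 1) i) 0) 0

-- ===== PORT B =====
-- One element of B's outer loop: skip non-positive x, else fold x into table[d] for the
-- divisor pair d ∈ (i, x // i) of each i = 1 … isqrt(x) dividing x (as in Source B).
def pvBStep (t : PySem.Dict Int Int) (x : Int) : PySem.Dict Int Int :=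
  if x ≤ 0 then t
  else
    (PySem.List.pyRange 1 ((Nat.sqrt x.toNat : Int) + 1) 1).foldl
      (fun t i =>
        if PySem.Int.mod x i = 0 then
          [i, PySem.Int.floordiv x i].foldl
            (fun t d => t.insert d (Int.gcd (t.getD d 0) x : Int)) t
        else t) t

def countDifferentSubsequenceGCDs_alt (nums : List Int) : Int :=
  ((PySem.Set.ofList nums).foldl pvBStep PySem.Dict.empty).items.foldl
    (fun acc p => if p.1 = p.2 then acc + 1 else acc) 0

-- ===== PRECONDITION & SPEC =====
-- Pre_ excludes only the empty list, on which A raises ValueError (max of an empty set).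
def Pre_countDifferentSubsequenceGCDs (nums : List Int) : Prop := nums ≠ []
instance (nums : List Int) : Decidable (Pre_countDifferentSubsequenceGCDs nums) := by unfold Pre_countDifferentSubsequenceGCDs; infer_instance
def pvWitness_countDifferentSubsequenceGCDs : List Int := [6, 10, 3]

def Spec_countDifferentSubsequenceGCDs (nums : List Int) (out : Int) : Prop := out = countDifferentSubsequenceGCDs_alt nums
instance (nums : List Int) (out : Int) : Decidable (Spec_countDifferentSubsequenceGCDs nums out) := by unfold Spec_countDifferentSubsequenceGCDs; infer_instance

-- ===== CLAIM (what is proved, stated in full; the proofs are below) =====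
def Claim_equal_countDifferentSubsequenceGCDs : Prop := ∀ (nums : List Int), Dom_countDifferentSubsequenceGCDs nums → Pre_countDifferentSubsequenceGCDs nums → Spec_countDifferentSubsequenceGCDs nums (countDifferentSubsequenceGCDs nums)

-- ===== LEMMAS AND PROOFS =====

-- The gcd of the positive elements of s divisible by d (0 when there are none): the value
-- both programs compute for candidate d.
def pvG (s : List Int) (d : Int) : Int :=
  s.foldl (fun g x => if 0 < x ∧ d ∣ x then (Int.gcd g x : Int) else g) 0

theorem pv_dvd_gcd {i a b : Int} (hi : 0 ≤ i) (ha : i ∣ a) (hb : i ∣ b) :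
    i ∣ (Int.gcd a b : Int) := by
  lift i to ℕ using hi
  exact Int.natCast_dvd_natCast.mpr (Int.dvd_gcd ha hb)

theorem pv_foldl_gcd_fix (i : Int) (hi : 0 ≤ i) :
    ∀ (L : List Int), (∀ j ∈ L, i ∣ j) →
      L.foldl (fun a j => (Int.gcd a j : Int)) i = i := by
  intro L
  induction L with
  | nil => intro _; rfl
  | cons j js ih =>
    intro h
    have h1 : (Int.gcd i j : Int) = i := by
      rw [Int.gcd_eq_natAbs_left (h j (by simp))]
      exact Int.natAbs_of_nonneg hi
    rw [List.foldl_cons, h1]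
    exact ih (fun x hx => h x (by simp [hx]))

theorem pv_aLoop_eq (s : List Int) (i : Int) (hi : 1 ≤ i) :
    ∀ (L : List Int) (g : Int), (∀ j ∈ L, 0 < j ∧ i ∣ j) → 0 ≤ g → i ∣ g → g ≠ i →
      pvALoop s i L g =
        if (L.filter (fun j => s.contains j)).foldl (fun a j => (Int.gcd a j : Int)) g = i
        then 1 else 0 := by
  intro L
  induction L with
  | nil => intro g _ _ _ hgi; simp [pvALoop, hgi]
  | cons j js ih =>
    intro g hL hg hdg hgi
    have hj0 : 0 < j := (hL j (by simp)).1
    have hdj : i ∣ j := (hL j (by simp)).2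
    have hLs : ∀ x ∈ js, 0 < x ∧ i ∣ x := fun x hx => hL x (by simp [hx])
    by_cases hjs : s.contains j
    · have hg' : (if g = 0 then j else (Int.gcd j g : Int)) = (Int.gcd g j : Int) := by
        by_cases h0 : g = 0
        · subst h0
          simp [Int.natAbs_of_nonneg (le_of_lt hj0)]
        · rw [if_neg h0, Int.gcd_comm]
      rw [show pvALoop s i (j :: js) g =
            (if s.contains j then
              (if (if g = 0 then j else (Int.gcd j g : Int)) = i then 1
               else pvALoop s i js (if g = 0 then j else (Int.gcd j g : Int)))
             else pvALoop s i js g) from rfl]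
      rw [if_pos hjs, hg']
      rw [show (j :: js).filter (fun j => s.contains j) = j :: js.filter (fun j => s.contains j)
            from by rw [List.filter_cons, if_pos hjs]]
      rw [List.foldl_cons]
      by_cases hgj : (Int.gcd g j : Int) = i
      · rw [if_pos hgj, hgj]
        rw [pv_foldl_gcd_fix i (by omega) _
          (fun x hx => (hLs x (List.mem_of_mem_filter hx)).2)]
        rw [if_pos rfl]
      · rw [if_neg hgj]
        exact ih ((Int.gcd g j : Int)) hLs (Int.natCast_nonneg _)
          (pv_dvd_gcd (by omega) hdg hdj) hgj
    · rw [show pvALoop s i (j :: js) g =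
            (if s.contains j then
              (if (if g = 0 then j else (Int.gcd j g : Int)) = i then 1
               else pvALoop s i js (if g = 0 then j else (Int.gcd j g : Int)))
             else pvALoop s i js g) from rfl]
      rw [if_neg hjs]
      rw [show (j :: js).filter (fun j => s.contains j) = js.filter (fun j => s.contains j)
            from by rw [List.filter_cons, if_neg hjs]]
      exact ih g hLs hg hdg hgi

theorem pv_nodup_pyRange_pos (a b : Int) {st : Int} (hst : 0 < st) :
    (PySem.List.pyRange a b st).Nodup := by
  rw [PySem.List.pyRange_of_pos a b hst]
  refine List.Nodup.map ?_ List.nodup_range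
  intro k1 k2 h
  have h2 := add_left_cancel h
  have h3 := mul_left_cancel₀ (by omega : (st : Int) ≠ 0) h2
  exact_mod_cast h3

theorem pv_pvG_eq_filter (s : List Int) (d : Int) :
    pvG s d = (s.filter (fun x => decide (0 < x) && decide (d ∣ x))).foldl
      (fun a x => (Int.gcd a x : Int)) 0 := by
  rw [List.foldl_filter]
  unfold pvG
  apply PySem.List.foldl_congr_mem
  intro acc x _
  by_cases h1 : 0 < x <;> by_cases h2 : d ∣ x <;> simp [h1, h2]

theorem pv_filter_perm (nums : List Int) (c i : Int)
    (hc : PySem.List.max? (PySem.Set.ofList nums) (fun x => x) = some c)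
    (hi : 1 ≤ i) :
    ((PySem.List.pyRange i (c + 1) i).filter
        (fun j => List.contains (PySem.Set.ofList nums) j)).Perm
      ((PySem.Set.ofList nums).filter (fun x => decide (0 < x) && decide (i ∣ x))) := by
  rw [List.perm_ext_iff_of_nodup
    (List.Nodup.filter _ (pv_nodup_pyRange_pos _ _ (by omega)))
    (List.Nodup.filter _ (PySem.Set.nodup_ofList nums))]
  intro j
  simp only [List.mem_filter, PySem.List.mem_pyRange_iff_of_pos (by omega : (0:Int) < i),
    List.contains_iff_mem, Bool.and_eq_true, decide_eq_true_eq]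
  constructor
  · rintro ⟨⟨h1, _, h3⟩, hmem⟩
    have hj : j ∈ PySem.Set.ofList nums := hmem
    have hdvd : i ∣ j := by
      have := dvd_add h3 (dvd_refl i)
      simpa using this
    exact ⟨hj, by omega, hdvd⟩
  · rintro ⟨hmem, hpos, hdvd⟩
    have hle : j ≤ c := PySem.List.max?_isMax hc j hmem
    have hij : i ≤ j := Int.le_of_dvd hpos hdvd
    exact ⟨⟨hij, by omega, dvd_sub hdvd (dvd_refl i)⟩, hmem⟩

theorem pv_gcd_rightcomm (z x y : Int) :
    (Int.gcd ((Int.gcd z x : Int)) y : Int) = (Int.gcd ((Int.gcd z y : Int)) x : Int) := by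
  have h : ((Int.gcd z x : Int)).gcd y = ((Int.gcd z y : Int)).gcd x := by
    rw [Int.gcd_assoc, Int.gcd_assoc, Int.gcd_comm x y]
  exact_mod_cast congrArg (fun n : ℕ => (n : Int)) h

theorem pv_foldl_gcd_perm {l1 l2 : List Int} (h : l1.Perm l2) (g : Int) :
    l1.foldl (fun a j => (Int.gcd a j : Int)) g = l2.foldl (fun a j => (Int.gcd a j : Int)) g :=
  h.foldl_eq' (fun x _ y _ z => pv_gcd_rightcomm z x y) g

theorem pv_aterm (nums : List Int) (c i : Int)
    (hc : PySem.List.max? (PySem.Set.ofList nums) (fun x => x) = some c)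
    (hi : 1 ≤ i) :
    pvALoop (PySem.Set.ofList nums) i (PySem.List.pyRange i (c + 1) i) 0 =
      if pvG (PySem.Set.ofList nums) i = i then 1 else 0 := by
  rw [pv_aLoop_eq (PySem.Set.ofList nums) i hi _ 0
    (fun j hj => by
      have h := (PySem.List.mem_pyRange_iff_of_pos (by omega : (0:Int) < i) j).mp hj
      refine ⟨by omega, ?_⟩
      have := dvd_add h.2.2 (dvd_refl i)
      simpa using this)
    le_rfl (dvd_zero i) (by omega)]
  rw [pv_foldl_gcd_perm (pv_filter_perm nums c i hc hi) 0]
  rw [← pv_pvG_eq_filter]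

theorem pv_A_eq_countP (nums : List Int) (c : Int)
    (hc : PySem.List.max? (PySem.Set.ofList nums) (fun x => x) = some c) :
    countDifferentSubsequenceGCDs nums =
      ((PySem.List.pyRange 1 (c + 1) 1).countP
        (fun i => decide (pvG (PySem.Set.ofList nums) i = i)) : Int) := by
  unfold countDifferentSubsequenceGCDs
  rw [hc]
  change (PySem.List.pyRange 1 (c + 1) 1).foldl
    (fun ans i => ans + pvALoop (PySem.Set.ofList nums) i (PySem.List.pyRange i (c + 1) i) 0) 0 = _
  rw [PySem.List.foldl_congr_mem _ _
    (fun ans i => ans +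
      if (fun i => decide (pvG (PySem.Set.ofList nums) i = i)) i = true then (1:Int) else 0) 0
    (by
      intro acc i hmem
      have hi : 1 ≤ i := (PySem.List.mem_pyRange_one.mp hmem).1
      rw [pv_aterm nums c i hc hi]
      by_cases h : pvG (PySem.Set.ofList nums) i = i <;> simp [h])]
  rw [PySem.List.foldl_add, PySem.List.sum_map_ite_one_zero, zero_add]

theorem pv_gcd_idem (a x : Int) :
    (Int.gcd ((Int.gcd a x : Int)) x : Int) = (Int.gcd a x : Int) := by
  have h : ((Int.gcd a x : Int)).gcd x = a.gcd x := by
    rw [Int.gcd_assoc, Int.gcd_self]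
    simp [Int.gcd, Int.natAbs_abs]
  exact_mod_cast congrArg (fun n : ℕ => (n : Int)) h

theorem pv_bPair_getD (x i : Int) (t : PySem.Dict Int Int) (d : Int) :
    ([i, PySem.Int.floordiv x i].foldl
        (fun t d => t.insert d (Int.gcd (t.getD d 0) x : Int)) t).getD d 0
      = if d = i ∨ d = PySem.Int.floordiv x i then (Int.gcd (t.getD d 0) x : Int)
        else t.getD d 0 := by
  simp only [List.foldl_cons, List.foldl_nil]
  rw [PySem.Dict.getD_insert]
  by_cases h2 : d = PySem.Int.floordiv x i
  · rw [if_pos h2, if_pos (Or.inr h2), ← h2, PySem.Dict.getD_insert]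
    by_cases h1 : d = i
    · rw [if_pos h1, h1]
      exact pv_gcd_idem _ x
    · rw [if_neg h1]
  · rw [if_neg h2, PySem.Dict.getD_insert]
    by_cases h1 : d = i
    · rw [if_pos h1, if_pos (Or.inl h1), h1]
    · rw [if_neg h1, if_neg (fun h => h.elim h1 h2)]

theorem pv_bPair_keys (x i : Int) (t : PySem.Dict Int Int) (d : Int) :
    (d ∈ ([i, PySem.Int.floordiv x i].foldl
        (fun t d => t.insert d (Int.gcd (t.getD d 0) x : Int)) t).keys
      ↔ d ∈ t.keys ∨ d = i ∨ d = PySem.Int.floordiv x i) := by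
  simp only [List.foldl_cons, List.foldl_nil]
  rw [PySem.Dict.mem_keys_insert, PySem.Dict.mem_keys_insert]
  tauto

theorem pv_bPair_nodup (x i : Int) (t : PySem.Dict Int Int) (ht : t.keys.Nodup) :
    ([i, PySem.Int.floordiv x i].foldl
        (fun t d => t.insert d (Int.gcd (t.getD d 0) x : Int)) t).keys.Nodup :=
  PySem.Dict.nodup_keys_insert _ _ _ (PySem.Dict.nodup_keys_insert _ _ _ ht)

theorem pv_bInner_getD (x : Int) :
    ∀ (L : List Int) (t : PySem.Dict Int Int) (d : Int),
      (L.foldl (fun t i =>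
          if PySem.Int.mod x i = 0 then
            [i, PySem.Int.floordiv x i].foldl
              (fun t d => t.insert d (Int.gcd (t.getD d 0) x : Int)) t
          else t) t).getD d 0
      = if ∃ i ∈ L, i ∣ x ∧ (d = i ∨ d = PySem.Int.floordiv x i)
        then (Int.gcd (t.getD d 0) x : Int) else t.getD d 0 := by
  intro L
  induction L with
  | nil => intro t d; simp
  | cons j js ih =>
    intro t d
    rw [List.foldl_cons]
    by_cases hm : PySem.Int.mod x j = 0
    · have hjx : j ∣ x := (PySem.Int.mod_eq_zero_iff_dvd x j).mp hm
      rw [if_pos hm, ih, pv_bPair_getD]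
      by_cases hd : d = j ∨ d = PySem.Int.floordiv x j
      · have hdj : ∃ i ∈ j :: js, i ∣ x ∧ (d = i ∨ d = PySem.Int.floordiv x i) :=
          ⟨j, List.mem_cons_self, hjx, hd⟩
        rw [if_pos hd]
        by_cases hex : ∃ i ∈ js, i ∣ x ∧ (d = i ∨ d = PySem.Int.floordiv x i)
        · rw [if_pos hex, pv_gcd_idem, if_pos hdj]
        · rw [if_neg hex, if_pos hdj]
      · rw [if_neg hd]
        by_cases hex : ∃ i ∈ js, i ∣ x ∧ (d = i ∨ d = PySem.Int.floordiv x i)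
        · have hcons : ∃ i ∈ j :: js, i ∣ x ∧ (d = i ∨ d = PySem.Int.floordiv x i) := by
            rcases hex with ⟨i, hi, hh⟩
            exact ⟨i, List.mem_cons_of_mem j hi, hh⟩
          rw [if_pos hex, if_pos hcons]
        · have hncons : ¬ ∃ i ∈ j :: js, i ∣ x ∧ (d = i ∨ d = PySem.Int.floordiv x i) := by
            rintro ⟨i, hi, hix, hdi⟩
            rcases List.mem_cons.mp hi with h | h
            · exact hd (h ▸ hdi)
            · exact hex ⟨i, h, hix, hdi⟩
          rw [if_neg hex, if_neg hncons]
    · have hjx : ¬ j ∣ x := fun h => hm ((PySem.Int.mod_eq_zero_iff_dvd x j).mpr h)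
      rw [if_neg hm, ih]
      by_cases hex : ∃ i ∈ js, i ∣ x ∧ (d = i ∨ d = PySem.Int.floordiv x i)
      · have hcons : ∃ i ∈ j :: js, i ∣ x ∧ (d = i ∨ d = PySem.Int.floordiv x i) := by
          rcases hex with ⟨i, hi, hh⟩
          exact ⟨i, List.mem_cons_of_mem j hi, hh⟩
        rw [if_pos hex, if_pos hcons]
      · have hncons : ¬ ∃ i ∈ j :: js, i ∣ x ∧ (d = i ∨ d = PySem.Int.floordiv x i) := by
          rintro ⟨i, hi, hix, hdi⟩
          rcases List.mem_cons.mp hi with h | h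
          · exact hjx (h ▸ hix)
          · exact hex ⟨i, h, hix, hdi⟩
        rw [if_neg hex, if_neg hncons]

theorem pv_bInner_keys (x : Int) :
    ∀ (L : List Int) (t : PySem.Dict Int Int) (d : Int),
      (d ∈ (L.foldl (fun t i =>
          if PySem.Int.mod x i = 0 then
            [i, PySem.Int.floordiv x i].foldl
              (fun t d => t.insert d (Int.gcd (t.getD d 0) x : Int)) t
          else t) t).keys
      ↔ d ∈ t.keys ∨ ∃ i ∈ L, i ∣ x ∧ (d = i ∨ d = PySem.Int.floordiv x i)) := by
  intro L
  induction L with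
  | nil => intro t d; simp
  | cons j js ih =>
    intro t d
    rw [List.foldl_cons]
    by_cases hm : PySem.Int.mod x j = 0
    · have hjx : j ∣ x := (PySem.Int.mod_eq_zero_iff_dvd x j).mp hm
      rw [if_pos hm, ih, pv_bPair_keys]
      constructor
      · rintro ((h | h) | ⟨i, hi, hh⟩)
        · exact Or.inl h
        · exact Or.inr ⟨j, by simp, hjx, h⟩
        · exact Or.inr ⟨i, by simp [hi], hh⟩
      · rintro (h | ⟨i, hi, hix, hdi⟩)
        · exact Or.inl (Or.inl h)
        · rcases List.mem_cons.mp hi with h | h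
          · exact Or.inl (Or.inr (h ▸ hdi))
          · exact Or.inr ⟨i, h, hix, hdi⟩
    · have hjx : ¬ j ∣ x := fun h => hm ((PySem.Int.mod_eq_zero_iff_dvd x j).mpr h)
      rw [if_neg hm, ih]
      constructor
      · rintro (h | ⟨i, hi, hh⟩)
        · exact Or.inl h
        · exact Or.inr ⟨i, by simp [hi], hh⟩
      · rintro (h | ⟨i, hi, hix, hdi⟩)
        · exact Or.inl h
        · rcases List.mem_cons.mp hi with h | h
          · exact absurd (h ▸ hix) hjx
          · exact Or.inr ⟨i, h, hix, hdi⟩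

theorem pv_bInner_nodup (x : Int) :
    ∀ (L : List Int) (t : PySem.Dict Int Int), t.keys.Nodup →
      (L.foldl (fun t i =>
          if PySem.Int.mod x i = 0 then
            [i, PySem.Int.floordiv x i].foldl
              (fun t d => t.insert d (Int.gcd (t.getD d 0) x : Int)) t
          else t) t).keys.Nodup := by
  intro L
  induction L with
  | nil => intro t ht; exact ht
  | cons j js ih =>
    intro t ht
    rw [List.foldl_cons]
    apply ih
    by_cases hm : PySem.Int.mod x j = 0
    · rw [if_pos hm]; exact pv_bPair_nodup x j t ht
    · rw [if_neg hm]; exact ht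

-- For positive x, the pairs (i, x // i) with i ≤ isqrt(x) and i ∣ x hit exactly the
-- positive divisors of x.
theorem pv_hit_iff (x d : Int) (hx : 0 < x) :
    (∃ i ∈ PySem.List.pyRange 1 ((Nat.sqrt x.toNat : Int) + 1) 1,
        i ∣ x ∧ (d = i ∨ d = PySem.Int.floordiv x i))
      ↔ (1 ≤ d ∧ d ∣ x) := by
  have h2 : ((x.toNat : Int)) = x := Int.toNat_of_nonneg (by omega)
  have hlt_sq : x < ((Nat.sqrt x.toNat : Int) + 1) * ((Nat.sqrt x.toNat : Int) + 1) := by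
    have h1 : x.toNat < (Nat.sqrt x.toNat + 1) * (Nat.sqrt x.toNat + 1) := by
      have := Nat.lt_succ_sqrt' x.toNat
      simpa [Nat.succ_eq_add_one, pow_two] using this
    calc x = ((x.toNat : Int)) := h2.symm
      _ < (((Nat.sqrt x.toNat + 1) * (Nat.sqrt x.toNat + 1) : ℕ) : Int) := by exact_mod_cast h1
      _ = ((Nat.sqrt x.toNat : Int) + 1) * ((Nat.sqrt x.toNat : Int) + 1) := by push_cast; ring
  constructor
  · rintro ⟨i, hi, hix, hdi⟩
    have hmem := PySem.List.mem_pyRange_one.mp hi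
    have hi1 : 1 ≤ i := hmem.1
    rcases hix with ⟨k, hk⟩
    have hk1 : 0 < k := by
      by_contra hcon
      have hk0 : k ≤ 0 := by omega
      have : i * k ≤ 0 := mul_nonpos_of_nonneg_of_nonpos (by omega) hk0
      omega
    have hfd : PySem.Int.floordiv x i = k := by
      rw [PySem.Int.floordiv_eq_ediv_of_pos (by omega), hk,
        Int.mul_ediv_cancel_left k (by omega)]
    rcases hdi with h | h
    · exact ⟨h ▸ hi1, h ▸ ⟨k, hk⟩⟩
    · rw [hfd] at h
      exact ⟨by omega, h ▸ ⟨i, by rw [hk]; ring⟩⟩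
  · rintro ⟨hd1, hdx⟩
    rcases hdx with ⟨e, he⟩
    have he1 : 0 < e := by
      by_contra hcon
      have he0 : e ≤ 0 := by omega
      have : d * e ≤ 0 := mul_nonpos_of_nonneg_of_nonpos (by omega) he0
      omega
    by_cases hds : d ≤ (Nat.sqrt x.toNat : Int)
    · exact ⟨d, PySem.List.mem_pyRange_one.mpr ⟨hd1, by omega⟩, ⟨e, he⟩, Or.inl rfl⟩
    · have hes : e ≤ (Nat.sqrt x.toNat : Int) := by
        by_contra hcon
        have hd1' : (Nat.sqrt x.toNat : Int) + 1 ≤ d := by omega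
        have he1' : (Nat.sqrt x.toNat : Int) + 1 ≤ e := by omega
        have h3 : ((Nat.sqrt x.toNat : Int) + 1) * ((Nat.sqrt x.toNat : Int) + 1) ≤ d * e :=
          mul_le_mul hd1' he1' (by positivity) (by omega)
        linarith [hlt_sq, h3, he.symm.le]
      have hfd : PySem.Int.floordiv x e = d := by
        rw [PySem.Int.floordiv_eq_ediv_of_pos (by omega), he,
          Int.mul_ediv_cancel d (by omega)]
      exact ⟨e, PySem.List.mem_pyRange_one.mpr ⟨by omega, by omega⟩,
        ⟨d, by rw [he]; ring⟩, Or.inr hfd.symm⟩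

theorem pv_bStep_getD (t : PySem.Dict Int Int) (x d : Int) :
    (pvBStep t x).getD d 0 =
      if 0 < x ∧ 1 ≤ d ∧ d ∣ x then (Int.gcd (t.getD d 0) x : Int) else t.getD d 0 := by
  unfold pvBStep
  by_cases hx : x ≤ 0
  · rw [if_pos hx, if_neg (fun h => absurd h.1 (by omega))]
  · rw [if_neg hx, pv_bInner_getD x]
    by_cases h : 1 ≤ d ∧ d ∣ x
    · rw [if_pos ((pv_hit_iff x d (by omega)).mpr h), if_pos ⟨by omega, h.1, h.2⟩]
    · rw [if_neg (fun hh => h ((pv_hit_iff x d (by omega)).mp hh)),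
        if_neg (fun hh => h ⟨hh.2.1, hh.2.2⟩)]

theorem pv_bStep_keys (t : PySem.Dict Int Int) (x d : Int) :
    d ∈ (pvBStep t x).keys ↔ d ∈ t.keys ∨ (0 < x ∧ 1 ≤ d ∧ d ∣ x) := by
  unfold pvBStep
  by_cases hx : x ≤ 0
  · rw [if_pos hx]
    constructor
    · exact Or.inl
    · rintro (h | h)
      · exact h
      · omega
  · rw [if_neg hx, pv_bInner_keys x]
    constructor
    · rintro (h | h)
      · exact Or.inl h
      · exact Or.inr ⟨by omega, (pv_hit_iff x d (by omega)).mp h⟩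
    · rintro (h | ⟨_, h1, h2⟩)
      · exact Or.inl h
      · exact Or.inr ((pv_hit_iff x d (by omega)).mpr ⟨h1, h2⟩)

theorem pv_bStep_nodup (t : PySem.Dict Int Int) (x : Int) (ht : t.keys.Nodup) :
    (pvBStep t x).keys.Nodup := by
  unfold pvBStep
  by_cases hx : x ≤ 0
  · rw [if_pos hx]; exact ht
  · rw [if_neg hx]; exact pv_bInner_nodup x _ t ht

theorem pv_bFold_getD :
    ∀ (l : List Int) (t : PySem.Dict Int Int) (d : Int),
      (l.foldl pvBStep t).getD d 0 =
        l.foldl (fun g x => if 0 < x ∧ 1 ≤ d ∧ d ∣ x then (Int.gcd g x : Int) else g)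
          (t.getD d 0) := by
  intro l
  induction l with
  | nil => intro t d; rfl
  | cons x xs ih =>
    intro t d
    rw [List.foldl_cons, List.foldl_cons, ih, pv_bStep_getD]

theorem pv_bFold_keys :
    ∀ (l : List Int) (t : PySem.Dict Int Int) (d : Int),
      (d ∈ (l.foldl pvBStep t).keys ↔ d ∈ t.keys ∨ ∃ x ∈ l, 0 < x ∧ 1 ≤ d ∧ d ∣ x) := by
  intro l
  induction l with
  | nil => intro t d; simp
  | cons x xs ih =>
    intro t d
    rw [List.foldl_cons, ih, pv_bStep_keys]
    constructor
    · rintro ((h | h) | ⟨y, hy, hh⟩)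
      · exact Or.inl h
      · exact Or.inr ⟨x, by simp, h⟩
      · exact Or.inr ⟨y, by simp [hy], hh⟩
    · rintro (h | ⟨y, hy, hh⟩)
      · exact Or.inl (Or.inl h)
      · rcases List.mem_cons.mp hy with h | h
        · exact Or.inl (Or.inr (h ▸ hh))
        · exact Or.inr ⟨y, h, hh⟩

theorem pv_bFold_nodup :
    ∀ (l : List Int) (t : PySem.Dict Int Int), t.keys.Nodup →
      (l.foldl pvBStep t).keys.Nodup := by
  intro l
  induction l with
  | nil => intro t ht; exact ht
  | cons x xs ih =>
    intro t ht
    rw [List.foldl_cons]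
    exact ih _ (pv_bStep_nodup t x ht)

theorem pv_table_getD (s : List Int) (d : Int) (hd : 1 ≤ d) :
    (s.foldl pvBStep PySem.Dict.empty).getD d 0 = pvG s d := by
  rw [pv_bFold_getD, PySem.Dict.getD_empty]
  unfold pvG
  apply PySem.List.foldl_congr_mem
  intro g x _
  by_cases h1 : 0 < x ∧ d ∣ x
  · rw [if_pos ⟨h1.1, hd, h1.2⟩, if_pos h1]
  · rw [if_neg (fun h => h1 ⟨h.1, h.2.2⟩), if_neg h1]

theorem pv_B_eq_countP (nums : List Int) :
    countDifferentSubsequenceGCDs_alt nums =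
      (((PySem.Set.ofList nums).foldl pvBStep PySem.Dict.empty).keys.countP
        (fun d => decide (pvG (PySem.Set.ofList nums) d = d)) : Int) := by
  unfold countDifferentSubsequenceGCDs_alt
  have hnd : ((PySem.Set.ofList nums).foldl pvBStep PySem.Dict.empty).keys.Nodup :=
    pv_bFold_nodup _ _ PySem.Dict.nodup_keys_empty
  rw [PySem.List.foldl_congr_mem _ _
    (fun acc (p : Int × Int) => if (fun p : Int × Int => decide (p.1 = p.2)) p = true
      then acc + 1 else acc) 0
    (by intro acc p _; by_cases h : p.1 = p.2 <;> simp [h])]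
  rw [PySem.List.foldl_count_if, zero_add]
  rw [PySem.Dict.items_eq_map_keys _ hnd 0, List.countP_map]
  congr 1
  apply List.countP_congr
  intro k hk
  have hk1 : 1 ≤ k := by
    rcases (pv_bFold_keys _ _ k).mp hk with h | ⟨x, _, _, h1, _⟩
    · simp [PySem.Dict.keys_empty] at h
    · exact h1
  simp only [Function.comp_apply, decide_eq_true_eq]
  rw [pv_table_getD _ k hk1]
  exact eq_comm

theorem pv_pvG_zero (d : Int) :
    ∀ (l : List Int) (g : Int), (∀ y ∈ l, ¬(0 < y ∧ d ∣ y)) →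
      l.foldl (fun g x => if 0 < x ∧ d ∣ x then (Int.gcd g x : Int) else g) g = g := by
  intro l
  induction l with
  | nil => intro g _; rfl
  | cons y ys ih =>
    intro g h
    rw [List.foldl_cons, if_neg (h y (by simp))]
    exact ih g (fun z hz => h z (by simp [hz]))

theorem pv_count_eq (nums : List Int) (c : Int)
    (hc : PySem.List.max? (PySem.Set.ofList nums) (fun x => x) = some c) :
    (PySem.List.pyRange 1 (c + 1) 1).countP
        (fun i => decide (pvG (PySem.Set.ofList nums) i = i)) =
      ((PySem.Set.ofList nums).foldl pvBStep PySem.Dict.empty).keys.countP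
        (fun d => decide (pvG (PySem.Set.ofList nums) d = d)) := by
  rw [List.countP_eq_length_filter, List.countP_eq_length_filter]
  apply List.Perm.length_eq
  rw [List.perm_ext_iff_of_nodup
    (List.Nodup.filter _ (pv_nodup_pyRange_pos 1 (c + 1) one_pos))
    (List.Nodup.filter _ (pv_bFold_nodup _ _ PySem.Dict.nodup_keys_empty))]
  intro d
  simp only [List.mem_filter, PySem.List.mem_pyRange_one, decide_eq_true_eq]
  constructor
  · rintro ⟨⟨h1, _⟩, hG⟩
    refine ⟨(pv_bFold_keys _ _ d).mpr (Or.inr ?_), hG⟩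
    by_contra hno
    have : pvG (PySem.Set.ofList nums) d = 0 := by
      apply pv_pvG_zero
      intro y hy hcon
      exact hno ⟨y, hy, hcon.1, h1, hcon.2⟩
    omega
  · rintro ⟨hmem, hG⟩
    rcases (pv_bFold_keys _ _ d).mp hmem with h | ⟨x, hx, hxpos, hd1, hdx⟩
    · simp [PySem.Dict.keys_empty] at h
    · have hxc : x ≤ c := PySem.List.max?_isMax hc x hx
      have : d ≤ x := Int.le_of_dvd hxpos hdx
      exact ⟨⟨hd1, by omega⟩, hG⟩

-- ===== VERDICT (by name: the statement is the Claim_ definition above) =====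
theorem countDifferentSubsequenceGCDs_spec : Claim_equal_countDifferentSubsequenceGCDs := by
  intro nums _ hpre
  unfold Spec_countDifferentSubsequenceGCDs
  cases hc : PySem.List.max? (PySem.Set.ofList nums) (fun x => x) with
  | none =>
    exfalso
    apply hpre
    have h0 := (PySem.List.max?_eq_none_iff _ _).mp hc
    cases nums with
    | nil => rfl
    | cons a l =>
      have : a ∈ PySem.Set.ofList (a :: l) := (PySem.Set.mem_ofList _ a).mpr (by simp)
      simp_all
  | some c =>
    rw [pv_A_eq_countP nums c hc, pv_B_eq_countP nums, pv_count_eq nums c hc]
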